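/-
  NON-VACUITY AND INTERFACE CHECKS OF Vorbis/Spec/Alloc.lean: every precondition of the group is one that a caller can establish.
  Each `example` derives the precondition of a call from what is known at its call site: the postcondition of the call before
  it, or a program point of the design (ADO, H0). Nothing here is used by a proof unit.

      (1) setup_malloc → setup_malloc           two allocations in a row (start_decoder)
      (2) setup_temp_malloc → setup_temp_free   the LIFO pairs of start_decoder (P1 – P4 of I6 §4.4)
      (3) ADO → setup_temp_malloc → arena_temp_restore → ADO     decode_residue, inverse_mdct
      (4) vorbis_init → setup_malloc            the first allocation; vorbis_init → `DeinitOK` (the failing open: vorbis_deinit(&p))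
      (5) vorbis_alloc: SD.12's final test makes it succeed
      (6) the machine-level contract of setup_temp_free is implied by the LIFO precondition (`setup_temp_free.calls_of_weak`
          is the proof that the two contracts fit), and its `sz = 0` instance keeps the shadow (`weak_zero`)
      (7) the preconditions that mention no arena are satisfiable as soon as the object is live
-/
import Vorbis.Spec.Alloc
namespace Vorbis.Spec.AllocTest
open X86 X86.User Asan Vorbis Vorbis.Spec

variable {others : List Obj} {frames : List (Nat × FrameLayout)} {A : Arena} {u v w : State}

/-- (1) After a successful `setup_malloc(f, n)` the precondition of the NEXT allocator call holds, at any later state `w` whose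
stack pointer is where the caller's was (`w.rsp + 8 = u.rsp + 8`: the same `top`), with the same `f` and the memory of `v`. -/
example (hpre : ArenaPre A others frames u) (hfit : A.Fits ((u.reg .rsi).toNat % 2 ^ 32))
    (hpost : (setup_malloc.spec others frames A).post u v)
    (hrsp : (w.reg .rsp).toNat = (u.reg .rsp).toNat) (hrdi : w.reg .rdi = u.reg .rdi) (hmem : w.mem = v.mem) :
    ArenaPre (A.pushSetup ((u.reg .rsi).toNat % 2 ^ 32)) (A.newSetupObj ((u.reg .rsi).toNat % 2 ^ 32) :: others) frames w := by
  obtain ⟨_, harena, hsh⟩ := hpost.1 hfit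
  refine ⟨⟨?_, hpre.offText_setup _⟩, ?_, ?_, ?_⟩
  · rw [hrsp, hmem]
    exact hsh
  · rw [hrdi]
    exact hpre.obj.cons _
  · rw [hrdi, hmem]
    exact harena
  · exact hpre.offText

/-- (2) After a successful `setup_temp_malloc(f, n)` the LIFO precondition of `setup_temp_free(f, p, sz)` holds for the block it
returned (`p = rax`) and any `sz` that rounds like `n`; ghosts: the new arena, `m = n`, `rest = A.temps`. -/
example (hpre : ArenaPre A others frames u) (hfit : A.Fits ((u.reg .rsi).toNat % 2 ^ 32))
    (hpost : (setup_temp_malloc.spec others frames A).post u v)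
    (hrsp : (w.reg .rsp).toNat = (u.reg .rsp).toNat) (hrdi : w.reg .rdi = u.reg .rdi) (hmem : w.mem = v.mem)
    (hrsi : w.reg .rsi = v.reg .rax) (hsz : r8 ((w.reg .rdx).toNat % 2 ^ 32) = r8 ((u.reg .rsi).toNat % 2 ^ 32))
    (hout : (u.reg .rdi).toNat + 1808 ≤ A.B ∨ A.B + A.L ≤ (u.reg .rdi).toNat) :
    (setup_temp_free.spec (A.newTempObj ((u.reg .rsi).toNat % 2 ^ 32) :: others) frames
      (A.pushTemp ((u.reg .rsi).toNat % 2 ^ 32)) ((u.reg .rsi).toNat % 2 ^ 32) A.temps).pre w := by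
  obtain ⟨hrax, harena, hsh⟩ := hpost.1 hfit
  -- `*f` (outside the arena's buffer: `StartDecoder.HandOK.objOut`) does not meet the block that is released
  have hfree := setup_temp_free.apart_of_out (m := (u.reg .rsi).toNat % 2 ^ 32) (rest := A.temps) harena
    (by simp only [varena]) (g := (u.reg .rdi).toNat) (by simp only [varena]; exact hout)
  rw [← hrdi] at hfree
  refine ⟨⟨⟨?_, hpre.offText_temp _⟩, ?_, ?_, ?_⟩, Or.inr ⟨?_, ?_, hsz, hfree⟩⟩
  · rw [hrsp, hmem]
    exact hsh
  · rw [hrdi]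
    exact hpre.obj.cons _
  · rw [hrdi, hmem]
    exact harena
  · exact hpre.offText
  · simp only [varena]
  · rw [hrsi, hrax]
    simp only [varena]

/-- (3a) Under ADO a decode-time request with `r8 n ≤ tmr` FITS (`temp_alloc_ok`): the success branch of `setup_temp_malloc`'s
post is the one that applies in decode_residue and inverse_mdct. -/
example {mem : Mem} {f : Nat} (h : ADO A others mem f) (n : Nat) (hn : r8 n ≤ stb_vorbis.temp_memory_required mem f) :
    A.Fits n :=
  (temp_alloc_ok h hn).1

/-- (3b) … and `arena_temp_restore(f, save)` with `save = L` (the `temp_offset` read at the caller's entry) has its precondition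
after that allocation: ghosts `dead = [the new block]`, `keep = []`. -/
example {f : Nat} (h : ADO A others u.mem f) (n : Nat) (hfit : A.Fits n)
    (hpre : ArenaPre (A.pushTemp n) (A.newTempObj n :: others) frames w) (hsave : (w.reg .rsi).toNat % 2 ^ 32 = A.L)
    (hblk : (A.pushTemp n).Block (w.reg .rdi).toNat 1808) :
    (arena_temp_restore.spec (A.newTempObj n :: others) frames (A.pushTemp n) [(A.T - (r8 n + 32), n)] []).pre w := by
  -- `*f` is a setup block of the arena (decode time: `DecodeInv.obj`): it does not meet the released range
  refine ⟨hpre, ?_, ?_, arena_temp_restore.apart_of_block hpre.arena hblk _⟩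
  · simp only [varena, h.idle, List.append_nil]
  · rw [hsave]
    have hfull := h.full
    unfold Arena.Fits at hfit
    simp only [varena, TempChain]
    refine ⟨trivial, ?_⟩
    omega

/-- (3c) … after which the ghost arena is the one before the allocation (`ADO.roundtrip`), so ADO can be re-established. -/
example {mem : Mem} {f : Nat} (h : ADO A others mem f) (n : Nat) : (A.pushTemp n).withTemp A.L [] = A :=
  h.roundtrip n

/-- (4a) After `vorbis_init(&p, z)` the precondition of the first allocator call holds, given that the arena lies above the
image's text (the start file: B = 800000H). -/
example {B len : Nat} (hB : L.textHi ≤ B) (hsh : ShadowPre others frames w)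
    (hlive : LiveIn others frames (u.reg .rdi).toNat Off.sizeof.stb_vorbis)
    (hpost : (vorbis_init.spec others frames B len).post u v) (hrdi : w.reg .rdi = u.reg .rdi) (hmem : w.mem = v.mem) :
    ArenaPre ⟨B, len / 8 * 8, 0, len / 8 * 8, [], []⟩ others frames w := by
  refine ⟨hsh, ?_, ?_, hB⟩
  · rw [hrdi]
    exact ObjLive.of_liveIn hlive
  · rw [hrdi, hmem]
    exact hpost.2.1

/-- (4b) After `vorbis_init(&p, z)` `DeinitOK(&p)` holds (H0 is the base case of H1 – H5): the precondition of `vorbis_deinit`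
on the failing path of stb_vorbis_open_memory. -/
example {B len : Nat} {Blk : Block → Prop} (hob : OB1 Blk (u.reg .rdi).toNat)
    (hpost : (vorbis_init.spec others frames B len).post u v) : DeinitOK Blk v.mem (u.reg .rdi).toNat := by
  obtain ⟨h0, harena, _⟩ := hpost
  apply h0.toH0s.deinitOK hob
  rw [harena.AR5.buffer]
  have := harena.AR1
  simp only at this ⊢
  omega

/-- (5) At SD.12 (`S + 1808 + tmr + 64 ≤ T`) `vorbis_alloc` succeeds: the success branch of its post applies. -/
example (tmr : Nat) (h : A.S + Off.sizeof.stb_vorbis + tmr + 64 ≤ A.T) : A.Fits Off.sizeof.stb_vorbis :=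
  ArenaOK.vorbis_alloc_fits A tmr h

/-- (6) The one call `setup_temp_free(f, values, 0)`: the machine-level precondition from what start_decoder knows there
(`*f` live, `alloc_buffer ≠ 0`, `values` an 8-aligned pointer into the arena, `sz = 0`). -/
example (hsh : ShadowPre others frames u) (hobj : ObjLive others frames (u.reg .rdi).toNat)
    (hbuf : stb_vorbis.alloc.alloc_buffer u.mem (u.reg .rdi).toNat ≠ 0) (h8 : (u.reg .rsi).toNat % 8 = 0)
    (hlo : 0x100000 ≤ (u.reg .rsi).toNat) (hhi : (u.reg .rsi).toNat ≤ 0xC00000) (hz : (u.reg .rdx).toNat % 2 ^ 32 = 0) :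
    (setup_temp_free.weakSpec others frames).pre u := by
  have e : r8 0 = 0 := by decide
  refine ⟨hsh, hobj, hbuf, Or.inr ⟨h8, hlo, ?_⟩, Or.inr (Or.inl ?_)⟩
  · rw [hz, e]
    omega
  · rw [hz, e]

/-- (7) The contracts without an arena ghost ask for the shadow clause and a live `*f` only: `setup_free` after `vorbis_deinit`
in stb_vorbis_close, from `DeinitOK`. -/
example {Blk : Block → Prop} (hsh : ShadowPre others frames u)
    (hlive : BlkLive Blk (Live (stackObjs frames ++ others))) (hd : DeinitOK Blk u.mem (u.reg .rdi).toNat) :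
    (setup_free.spec others frames).pre u :=
  ⟨hsh, ObjLive.of_ob1 hlive hd.ob1⟩

/-- (7) `vorbis_deinit`'s precondition from a program point's environment (`Env Blk Live mem` of Vorbis/State.lean: its fields
`.ok`, `.live`) and `DeinitOK` (`Real.SD.deinitOK`, `Real.FB.deinitOK`, `Real.P3`). -/
example {Blk : Block → Prop} (hsh : ShadowPre others frames u) (hok : BlkOK Blk)
    (hlive : BlkLive Blk (Live (stackObjs frames ++ others))) (hd : DeinitOK Blk u.mem (u.reg .rdi).toNat) :
    (vorbis_deinit.spec others frames Blk).pre u :=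
  ⟨hsh, hok, hlive, hd⟩

/-- (8) **The allocators' common precondition from the hand-over carrier** (`Hand`, Vorbis/Spec/Common.lean — what start_decoder
carries as `StartDecoder.HandOK` and decode time as `DecodeInv.hand`): OB1 at the shadow level is `Hand.objLive`, the arena above the
text is `Hand.offText`; the shadow clause and ArenaOK are the caller's own. -/
example {len : Nat} (hsh : ShadowPre others frames u) (hh : Hand others frames len A (u.reg .rdi).toNat)
    (ha : ArenaOK A others u.mem (u.reg .rdi).toNat) : ArenaPre A others frames u :=
  ⟨hsh, hh.objLive, ha, hh.offText⟩

end Vorbis.Spec.AllocTest
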